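-- pv_equiv track=rewrite | github.com/l3dlp-sandbox/skift | .sk/sk.py | inject_manifest
-- ===== SOURCE A (Python) =====
-- import copy
--
-- def inject_manifest(manifest: dict) -> dict:
--     manifest = copy.deepcopy(manifest)
--     for key in manifest:
--         item = manifest[key]
--         if "inject" in item:
--             for inject in item["inject"]:
--                 if inject in manifest:
--                     manifest[inject]["deps"].append(key)
--     return manifest
-- ===== SOURCE B (Python) =====
-- import copy
--
-- def inject_manifest(manifest: dict) -> dict:
--     manifest = copy.deepcopy(manifest)
--     additions = {}
--     for key, item in manifest.items():
--         if "inject" in item: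
--             for inject in item["inject"]:
--                 if inject in manifest:
--                     additions.setdefault(inject, []).append(key)
--     for target, keys in additions.items():
--         manifest[target]["deps"].extend(keys)
--     return manifest
-- ===== Notes on version B (the rewrite author's own statement) =====
-- stated objective: alternative
-- what changed: Instead of scattering appends into the manifest while iterating it, B first builds a reverse-dependency index (target -> list of source keys) in one read-only pass and then applies each target's accumulated keys in a single extend per target.
import Mathlib
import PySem

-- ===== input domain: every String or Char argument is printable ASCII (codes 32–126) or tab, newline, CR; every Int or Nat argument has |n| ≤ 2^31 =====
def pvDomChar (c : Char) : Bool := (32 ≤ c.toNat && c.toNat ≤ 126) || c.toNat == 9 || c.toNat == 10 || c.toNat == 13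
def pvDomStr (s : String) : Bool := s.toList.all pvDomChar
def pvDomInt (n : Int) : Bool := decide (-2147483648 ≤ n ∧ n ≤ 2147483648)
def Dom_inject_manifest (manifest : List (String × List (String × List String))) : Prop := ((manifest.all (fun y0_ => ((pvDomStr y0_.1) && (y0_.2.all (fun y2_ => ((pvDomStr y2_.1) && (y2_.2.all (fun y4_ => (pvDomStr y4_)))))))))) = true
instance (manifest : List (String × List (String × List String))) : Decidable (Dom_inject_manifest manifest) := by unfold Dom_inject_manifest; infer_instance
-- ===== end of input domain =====

-- B builds a reverse-dependency index first and then applies it, instead of A's in-place scatter;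
-- equivalence of the RETURN value (both Pythons deepcopy, neither mutates the caller's argument).

-- shared dict-as-assoc-list primitives (first-match lookup / first-match in-place value update)
def pvLook? {α : Type} (m : List (String × α)) (k : String) : Option α :=
  match m with
  | [] => none
  | (a, b) :: rest => if a = k then some b else pvLook? rest k

def pvMod {α : Type} (m : List (String × α)) (k : String) (f : α → α) : List (String × α) :=
  match m with
  | [] => []
  | (a, b) :: rest => if a = k then (a, f b) :: rest else (a, b) :: pvMod rest k f

-- ===== PORT A =====
def inject_manifest (manifest : List (String × List (String × List String))) : List (String × List (String × List String)) :=
  (manifest.map Prod.fst).foldl (fun acc key =>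
    match pvLook? acc key with
    | none => acc          -- unreachable: key is one of the manifest's own keys
    | some item =>
      match pvLook? item "inject" with
      | none => acc
      | some injs =>
        injs.foldl (fun acc2 inj =>
          if (pvLook? acc2 inj).isSome then
            pvMod acc2 inj (fun it => pvMod it "deps" (fun d => d ++ [key]))
          else acc2) acc) manifest

-- ===== PORT B =====
def pvAddKey (adds : List (String × List String)) (t k : String) : List (String × List String) :=
  if (pvLook? adds t).isSome then pvMod adds t (fun ks => ks ++ [k]) else adds ++ [(t, [k])]

def inject_manifest_alt (manifest : List (String × List (String × List String))) : List (String × List (String × List String)) :=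
  let additions : List (String × List String) :=
    manifest.foldl (fun adds p =>
      match pvLook? p.2 "inject" with
      | none => adds
      | some injs =>
        injs.foldl (fun adds2 inj =>
          if (pvLook? manifest inj).isSome then pvAddKey adds2 inj p.1 else adds2) adds) []
  additions.foldl (fun acc q =>
    pvMod acc q.1 (fun it => pvMod it "deps" (fun d => d ++ q.2))) manifest

-- ===== PRECONDITION & SPEC =====
-- Pre_ excludes (a) association lists with duplicate top-level keys, which do not encode any Python
-- dict, and (b) inputs on which some referenced inject target lacks a "deps" key, where Python A
-- raises KeyError.
def Pre_inject_manifest (manifest : List (String × List (String × List String))) : Prop :=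
  (manifest.map Prod.fst).Nodup ∧
  ∀ p ∈ manifest, ∀ injs ∈ pvLook? p.2 "inject", ∀ inj ∈ injs,
    ∀ it2 ∈ pvLook? manifest inj, (pvLook? it2 "deps").isSome = true
instance (manifest : List (String × List (String × List String))) : Decidable (Pre_inject_manifest manifest) := by unfold Pre_inject_manifest; infer_instance

def pvWitness_inject_manifest : (List (String × List (String × List String))) :=
  [("a", [("deps", []), ("inject", ["a", "b"])]), ("b", [("deps", ["x"])])]

def Spec_inject_manifest (manifest : List (String × List (String × List String))) (out : List (String × List (String × List String))) : Prop := out = inject_manifest_alt manifest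
instance (manifest : List (String × List (String × List String))) (out : List (String × List (String × List String))) : Decidable (Spec_inject_manifest manifest out) := by unfold Spec_inject_manifest; infer_instance

-- ===== CLAIM (what is proved, stated in full; the proofs are below) =====
def Claim_equal_inject_manifest : Prop := ∀ (manifest : List (String × List (String × List String))), Dom_inject_manifest manifest → Pre_inject_manifest manifest → Spec_inject_manifest manifest (inject_manifest manifest)

-- ===== LEMMAS AND PROOFS =====

-- pointwise writer: append F t to the (first) "deps" list of the item at key t
def pvWrite (F : String → List String) (p : String × List (String × List String)) : String × List (String × List String) :=
  (p.1, pvMod p.2 "deps" (fun d => d ++ F p.1))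

-- keys contributed to target t, A's traversal order (by key list, items looked up)
def pvAddForKeys (m : List (String × List (String × List String))) (ks : List String) (t : String) : List String :=
  ks.flatMap (fun k =>
    match pvLook? m k with
    | none => []
    | some it =>
      match pvLook? it "inject" with
      | none => []
      | some injs => (injs.filter (fun inj => (pvLook? m inj).isSome && (inj == t))).map (fun _ => k))

-- keys contributed to target t, B's traversal order (by pairs)
def pvAddFor (m mm : List (String × List (String × List String))) (t : String) : List String :=
  mm.flatMap (fun p =>
    match pvLook? p.2 "inject" with
    | none => []
    | some injs => (injs.filter (fun inj => (pvLook? m inj).isSome && (inj == t))).map (fun _ => p.1))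

def pvGetAdd (adds : List (String × List String)) (t : String) : List String :=
  (pvLook? adds t).getD []

theorem look_map {α : Type} (m : List (String × α)) (g : String → α → α) (k : String) :
    pvLook? (m.map (fun p => (p.1, g p.1 p.2))) k = (pvLook? m k).map (g k) := by
  induction m with
  | nil => rfl
  | cons p rest ih =>
    obtain ⟨a, b⟩ := p
    by_cases h : a = k <;> simp [pvLook?, h, ih]

theorem map_fst_write (m : List (String × List (String × List String))) (F : String → List String) :
    (m.map (pvWrite F)).map Prod.fst = m.map Prod.fst := by
  simp [pvWrite, List.map_map, Function.comp]

theorem look_mod {α : Type} (m : List (String × α)) (k : String) (f : α → α) (t : String) :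
    pvLook? (pvMod m k f) t = if t = k then (pvLook? m k).map f else pvLook? m t := by
  induction m with
  | nil => by_cases h : t = k <;> simp [pvLook?, pvMod, h]
  | cons p rest ih =>
    obtain ⟨a, b⟩ := p
    by_cases h : a = k
    · subst h
      by_cases h2 : t = a <;> simp [pvLook?, pvMod, h2, Eq.comm]
    · by_cases h2 : a = t
      · subst h2
        simp [pvLook?, pvMod, h]
      · simp [pvLook?, pvMod, h, h2, ih]

theorem mod_map_fst {α : Type} (m : List (String × α)) (k : String) (f : α → α) :
    (pvMod m k f).map Prod.fst = m.map Prod.fst := by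
  induction m with
  | nil => rfl
  | cons p rest ih =>
    obtain ⟨a, b⟩ := p
    by_cases h : a = k <;> simp [pvMod, h, ih]

theorem mod_id {α : Type} (m : List (String × α)) (k : String) (f : α → α) (hf : ∀ b, f b = b) :
    pvMod m k f = m := by
  induction m with
  | nil => rfl
  | cons p rest ih =>
    obtain ⟨a, b⟩ := p
    by_cases h : a = k <;> simp [pvMod, h, ih, hf]

theorem mod_mod {α : Type} (m : List (String × α)) (k : String) (f g : α → α) :
    pvMod (pvMod m k f) k g = pvMod m k (fun x => g (f x)) := by
  induction m with
  | nil => rfl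
  | cons p rest ih =>
    obtain ⟨a, b⟩ := p
    by_cases h : a = k <;> simp [pvMod, h, ih]

theorem look_eq_none_of_not_mem {α : Type} (m : List (String × α)) (k : String)
    (h : k ∉ m.map Prod.fst) : pvLook? m k = none := by
  induction m with
  | nil => rfl
  | cons p rest ih =>
    obtain ⟨a, b⟩ := p
    simp at h
    have hne : ¬ a = k := fun he => h.1 (he ▸ rfl) |>.elim
    simp [pvLook?, hne, ih (by simpa using h.2)]

theorem look_isSome_iff_mem {α : Type} (m : List (String × α)) (k : String) :
    (pvLook? m k).isSome = true ↔ k ∈ m.map Prod.fst := by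
  induction m with
  | nil => simp [pvLook?]
  | cons p rest ih =>
    obtain ⟨a, b⟩ := p
    by_cases h : a = k
    · simp [pvLook?, h]
    · simp only [pvLook?, if_neg h, ih, List.map_cons, List.mem_cons]
      constructor
      · exact Or.inr
      · rintro (he | hm)
        · exact absurd he.symm h
        · exact hm

theorem mod_nodup_map {α : Type} (m : List (String × α)) (k : String) (f : α → α)
    (h : (m.map Prod.fst).Nodup) :
    pvMod m k f = m.map (fun p => if p.1 = k then (p.1, f p.2) else p) := by
  induction m with
  | nil => rfl
  | cons p rest ih =>
    obtain ⟨a, b⟩ := p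
    simp at h
    by_cases hk : a = k
    · subst hk
      have hrest : rest.map (fun p' => if p'.1 = a then (p'.1, f p'.2) else p') = rest := by
        have := List.map_congr_left (l := rest)
          (f := fun p' : String × α => if p'.1 = a then (p'.1, f p'.2) else p') (g := id)
          (by intro q hq
              have hne : q.1 ≠ a := fun he => h.1 q.2 (by rw [← he]; exact hq)
              simp [hne])
        rw [this, List.map_id]
      simp [pvMod, hrest]
    · simp [pvMod, hk, ih h.2]


theorem mod_ext {α : Type} (m : List (String × α)) (k : String) {f g : α → α}
    (h : ∀ b, f b = g b) : pvMod m k f = pvMod m k g := by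
  have : f = g := funext h
  rw [this]

theorem map_write_ext (m : List (String × List (String × List String)))
    {F G : String → List String} (h : ∀ t, F t = G t) :
    m.map (pvWrite F) = m.map (pvWrite G) := by
  have : F = G := funext h
  rw [this]

theorem write_nil (m : List (String × List (String × List String))) :
    m.map (pvWrite (fun _ => [])) = m := by
  have h : ∀ p ∈ m, pvWrite (fun _ => []) p = id p := by
    intro p _
    unfold pvWrite
    rw [mod_id _ _ _ (by simp)]
    rfl
  rw [List.map_congr_left h, List.map_id]

theorem look_write (m : List (String × List (String × List String)))
    (F : String → List String) (k : String) :
    pvLook? (m.map (pvWrite F)) k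
      = (pvLook? m k).map (fun it => pvMod it "deps" (fun d => d ++ F k)) := by
  exact look_map m (fun k it => pvMod it "deps" (fun d => d ++ F k)) k

theorem step_write (m : List (String × List (String × List String)))
    (G : String → List String) (inj : String) (ks0 : List String)
    (h : (m.map Prod.fst).Nodup) :
    pvMod (m.map (pvWrite G)) inj (fun it => pvMod it "deps" (fun d => d ++ ks0))
      = m.map (pvWrite (fun t => G t ++ if t = inj then ks0 else [])) := by
  rw [mod_nodup_map _ _ _ (by rw [map_fst_write]; exact h), List.map_map]
  apply List.map_congr_left
  intro p _
  by_cases ht : p.1 = inj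
  · simp only [Function.comp, pvWrite, ht, if_pos rfl, mod_mod]
    refine congrArg _ (mod_ext _ _ ?_)
    intro b
    simp [List.append_assoc]
  · simp only [Function.comp, pvWrite, if_neg ht]
    refine congrArg _ (mod_ext _ _ ?_)
    intro b
    simp

theorem inner_char (m : List (String × List (String × List String)))
    (hm : (m.map Prod.fst).Nodup) (k : String) :
    ∀ (injs : List String) (G : String → List String),
    injs.foldl (fun acc2 inj =>
        if (pvLook? acc2 inj).isSome then
          pvMod acc2 inj (fun it => pvMod it "deps" (fun d => d ++ [k]))
        else acc2) (m.map (pvWrite G))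
      = m.map (pvWrite (fun t => G t ++
          ((injs.filter (fun inj => (pvLook? m inj).isSome && (inj == t))).map (fun _ => k)))) := by
  intro injs
  induction injs with
  | nil =>
    intro G
    simp only [List.foldl_nil, List.filter_nil, List.map_nil]
    exact (map_write_ext m (by simp)).symm
  | cons inj rest ih =>
    intro G
    have hguard : (pvLook? (m.map (pvWrite G)) inj).isSome = (pvLook? m inj).isSome := by
      rw [look_write]; exact Option.isSome_map ..
    by_cases hs : (pvLook? m inj).isSome = true
    · simp only [List.foldl_cons, hguard, hs, if_true]
      rw [step_write m G inj [k] hm, ih]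
      apply map_write_ext
      intro t
      by_cases ht : t = inj
      · subst ht
        simp [List.filter_cons, hs, List.append_assoc]
      · have : (inj == t) = false := by
          simp [beq_eq_false_iff_ne]
          exact fun he => ht he.symm
        simp [List.filter_cons, this, ht]
    · have hs' : (pvLook? m inj).isSome = false := by simpa using hs
      simp only [List.foldl_cons, hguard, hs', Bool.false_eq_true, if_false]
      rw [ih]
      apply map_write_ext
      intro t
      simp [List.filter_cons, hs']

theorem outer_char (m : List (String × List (String × List String)))
    (hm : (m.map Prod.fst).Nodup) :
    ∀ (ks : List String) (G : String → List String),
    ks.foldl (fun acc key =>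
        match pvLook? acc key with
        | none => acc
        | some item =>
          match pvLook? item "inject" with
          | none => acc
          | some injs =>
            injs.foldl (fun acc2 inj =>
              if (pvLook? acc2 inj).isSome then
                pvMod acc2 inj (fun it => pvMod it "deps" (fun d => d ++ [key]))
              else acc2) acc) (m.map (pvWrite G))
      = m.map (pvWrite (fun t => G t ++ pvAddForKeys m ks t)) := by
  intro ks
  induction ks with
  | nil =>
    intro G
    simp only [List.foldl_nil]
    exact (map_write_ext m (by simp [pvAddForKeys])).symm
  | cons k rest ih =>
    intro G
    simp only [List.foldl_cons]
    cases hmk : pvLook? m k with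
    | none =>
      rw [look_write, hmk]
      simp only [Option.map_none]
      rw [ih]
      apply map_write_ext
      intro t
      simp [pvAddForKeys, hmk]
    | some it =>
      rw [look_write, hmk]
      simp only [Option.map_some]
      have hne : ("inject" : String) ≠ "deps" := by decide
      cases hinj : pvLook? it "inject" with
      | none =>
        rw [look_mod, if_neg hne, hinj]
        rw [ih]
        apply map_write_ext
        intro t
        simp [pvAddForKeys, hmk, hinj]
      | some injs =>
        rw [look_mod, if_neg hne, hinj]
        dsimp only
        rw [inner_char m hm k injs G, ih]
        apply map_write_ext
        intro t
        simp [pvAddForKeys, hmk, hinj, List.append_assoc]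

theorem a_char (m : List (String × List (String × List String)))
    (hm : (m.map Prod.fst).Nodup) :
    inject_manifest m = m.map (pvWrite (fun t => pvAddForKeys m (m.map Prod.fst) t)) := by
  unfold inject_manifest
  have h0 := outer_char m hm (m.map Prod.fst) (fun _ => [])
  rw [write_nil] at h0
  rw [h0]
  apply map_write_ext
  intro t
  simp

theorem second_char (m : List (String × List (String × List String)))
    (hm : (m.map Prod.fst).Nodup) :
    ∀ (adds : List (String × List String)) (G : String → List String),
    (adds.map Prod.fst).Nodup →
    adds.foldl (fun acc q => pvMod acc q.1 (fun it => pvMod it "deps" (fun d => d ++ q.2)))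
        (m.map (pvWrite G))
      = m.map (pvWrite (fun t => G t ++ pvGetAdd adds t)) := by
  intro adds
  induction adds with
  | nil =>
    intro G _
    simp only [List.foldl_nil]
    exact (map_write_ext m (by simp [pvGetAdd, pvLook?])).symm
  | cons q rest ih =>
    intro G hn
    obtain ⟨t0, ks0⟩ := q
    simp only [List.map_cons, List.nodup_cons] at hn
    simp only [List.foldl_cons]
    rw [step_write m G t0 ks0 hm, ih _ hn.2]
    apply map_write_ext
    intro t
    by_cases ht : t = t0
    · subst ht
      have : pvLook? rest t = none := look_eq_none_of_not_mem rest t hn.1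
      simp [pvGetAdd, pvLook?, this]
    · have : ¬ t0 = t := fun he => ht he.symm
      simp [pvGetAdd, pvLook?, this, ht]

theorem look_append {α : Type} (xs ys : List (String × α)) (t : String) :
    pvLook? (xs ++ ys) t = (pvLook? xs t).or (pvLook? ys t) := by
  induction xs with
  | nil => simp [pvLook?]
  | cons p rest ih =>
    obtain ⟨a, b⟩ := p
    by_cases h : a = t <;> simp [pvLook?, h, ih]

theorem getAdd_addKey (adds : List (String × List String)) (t0 k t : String) :
    pvGetAdd (pvAddKey adds t0 k) t = pvGetAdd adds t ++ (if t = t0 then [k] else []) := by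
  unfold pvAddKey
  by_cases hs : (pvLook? adds t0).isSome = true
  · rw [if_pos hs]
    unfold pvGetAdd
    rw [look_mod]
    by_cases ht : t = t0
    · subst ht
      obtain ⟨v, hv⟩ := Option.isSome_iff_exists.mp hs
      simp [hv]
    · simp [ht]
  · rw [if_neg hs]
    unfold pvGetAdd
    rw [look_append]
    by_cases ht : t = t0
    · subst ht
      have : pvLook? adds t = none := by
        cases h : pvLook? adds t with
        | none => rfl
        | some v => rw [h] at hs; simp at hs
      simp [this, pvLook?]
    · have : ¬ t0 = t := fun he => ht he.symm
      simp [pvLook?, this, ht]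

theorem nodup_addKey (adds : List (String × List String)) (t k : String)
    (h : (adds.map Prod.fst).Nodup) : ((pvAddKey adds t k).map Prod.fst).Nodup := by
  unfold pvAddKey
  by_cases hs : (pvLook? adds t).isSome = true
  · rw [if_pos hs, mod_map_fst]; exact h
  · rw [if_neg hs]
    have hnm : t ∉ adds.map Prod.fst := fun hmem => hs ((look_isSome_iff_mem adds t).mpr hmem)
    rw [List.map_append]
    simp only [List.map_cons, List.map_nil]
    refine List.Nodup.append h (List.nodup_singleton t) ?_
    intro a ha hb
    simp only [List.mem_singleton] at hb
    subst hb
    exact hnm ha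

theorem nodup_inner_build (m : List (String × List (String × List String))) (k : String) :
    ∀ (injs : List String) (adds : List (String × List String)),
    (adds.map Prod.fst).Nodup →
    (((injs.foldl (fun adds2 inj =>
        if (pvLook? m inj).isSome then pvAddKey adds2 inj k else adds2) adds)).map Prod.fst).Nodup := by
  intro injs
  induction injs with
  | nil => intro adds h; exact h
  | cons inj rest ih =>
    intro adds h
    simp only [List.foldl_cons]
    by_cases hs : (pvLook? m inj).isSome = true
    · rw [if_pos hs]; exact ih _ (nodup_addKey adds inj k h)
    · rw [if_neg hs]; exact ih _ h

theorem nodup_build (m : List (String × List (String × List String))) :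
    ∀ (mm : List (String × List (String × List String))) (adds : List (String × List String)),
    (adds.map Prod.fst).Nodup →
    ((mm.foldl (fun adds p =>
        match pvLook? p.2 "inject" with
        | none => adds
        | some injs =>
          injs.foldl (fun adds2 inj =>
            if (pvLook? m inj).isSome then pvAddKey adds2 inj p.1 else adds2) adds) adds).map Prod.fst).Nodup := by
  intro mm
  induction mm with
  | nil => intro adds h; exact h
  | cons p rest ih =>
    intro adds h
    simp only [List.foldl_cons]
    cases hinj : pvLook? p.2 "inject" with
    | none => exact ih _ h
    | some injs => exact ih _ (nodup_inner_build m p.1 injs adds h)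

theorem inner_build (m : List (String × List (String × List String))) (k t : String) :
    ∀ (injs : List String) (adds : List (String × List String)),
    pvGetAdd (injs.foldl (fun adds2 inj =>
        if (pvLook? m inj).isSome then pvAddKey adds2 inj k else adds2) adds) t
      = pvGetAdd adds t ++
        ((injs.filter (fun inj => (pvLook? m inj).isSome && (inj == t))).map (fun _ => k)) := by
  intro injs
  induction injs with
  | nil => intro adds; simp
  | cons inj rest ih =>
    intro adds
    simp only [List.foldl_cons]
    by_cases hs : (pvLook? m inj).isSome = true
    · rw [if_pos hs, ih, getAdd_addKey]
      by_cases ht : t = inj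
      · subst ht
        simp [List.filter_cons, hs, List.append_assoc]
      · have : (inj == t) = false := by
          simp [beq_eq_false_iff_ne]
          exact fun he => ht he.symm
        simp [List.filter_cons, this, ht, hs]
    · have hs' : (pvLook? m inj).isSome = false := by simpa using hs
      rw [if_neg hs, ih]
      simp [List.filter_cons, hs']

theorem build_char (m : List (String × List (String × List String))) (t : String) :
    ∀ (mm : List (String × List (String × List String))) (adds : List (String × List String)),
    pvGetAdd (mm.foldl (fun adds p =>
        match pvLook? p.2 "inject" with
        | none => adds
        | some injs =>
          injs.foldl (fun adds2 inj =>
            if (pvLook? m inj).isSome then pvAddKey adds2 inj p.1 else adds2) adds) adds) t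
      = pvGetAdd adds t ++ pvAddFor m mm t := by
  intro mm
  induction mm with
  | nil => intro adds; simp [pvAddFor]
  | cons p rest ih =>
    intro adds
    simp only [List.foldl_cons]
    cases hinj : pvLook? p.2 "inject" with
    | none =>
      rw [ih]
      simp [pvAddFor, hinj]
    | some injs =>
      rw [ih, inner_build]
      simp [pvAddFor, hinj, List.append_assoc]

theorem addForKeys_eq_addFor (m : List (String × List (String × List String))) :
    ∀ (mm : List (String × List (String × List String))),
    (mm.map Prod.fst).Nodup →
    (∀ k ∈ mm.map Prod.fst, pvLook? mm k = pvLook? m k) →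
    ∀ t, pvAddForKeys m (mm.map Prod.fst) t = pvAddFor m mm t := by
  intro mm
  induction mm with
  | nil => intro _ _ t; rfl
  | cons p rest ih =>
    intro hm hsub t
    obtain ⟨a, b⟩ := p
    simp only [List.map_cons, List.nodup_cons] at hm
    have ha : pvLook? m a = some b := by
      have h1 := hsub a (by simp)
      simp only [pvLook?, if_pos rfl] at h1
      exact h1.symm
    have hsub' : ∀ k ∈ rest.map Prod.fst, pvLook? rest k = pvLook? m k := by
      intro k hk
      have hka : ¬ a = k := fun he => hm.1 (he ▸ hk)
      have h2 := hsub k (by simp [hk])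
      simpa only [pvLook?, if_neg hka] using h2
    have htail := ih hm.2 hsub' t
    simp only [pvAddForKeys, List.map_cons, List.flatMap_cons, ha] at *
    simp only [pvAddFor, List.flatMap_cons]
    rw [htail]
    rfl

def pvBuild (m : List (String × List (String × List String))) : List (String × List String) :=
  m.foldl (fun adds p =>
    match pvLook? p.2 "inject" with
    | none => adds
    | some injs =>
      injs.foldl (fun adds2 inj =>
        if (pvLook? m inj).isSome then pvAddKey adds2 inj p.1 else adds2) adds) []

theorem b_char (m : List (String × List (String × List String)))
    (hm : (m.map Prod.fst).Nodup) :
    inject_manifest_alt m = m.map (pvWrite (fun t => pvAddFor m m t)) := by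
  have key : inject_manifest_alt m
      = (pvBuild m).foldl
          (fun acc q => pvMod acc q.1 (fun it => pvMod it "deps" (fun d => d ++ q.2))) m := rfl
  rw [key]
  have hnb : ((pvBuild m).map Prod.fst).Nodup := nodup_build m m [] (by simp)
  have h0 := second_char m hm (pvBuild m) (fun _ => []) hnb
  rw [write_nil] at h0
  rw [h0]
  apply map_write_ext
  intro t
  have hb := build_char m t m []
  simp only [pvBuild]
  rw [hb]
  simp [pvGetAdd, pvLook?]

-- ===== VERDICT (by name: the statement is the Claim_ definition above) =====
theorem inject_manifest_spec : Claim_equal_inject_manifest := by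
  intro m _ hpre
  unfold Spec_inject_manifest
  rw [a_char m hpre.1, b_char m hpre.1]
  apply map_write_ext
  intro t
  exact addForKeys_eq_addFor m m hpre.1 (fun _ _ => rfl) t
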